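-- pv_equiv track=rewrite | github.com/onceonceonce/-XBNet- | 后端代码/Utils/new.py | count_hospitals_by_label
-- ===== SOURCE A (Python) =====
-- def count_hospitals_by_label(data):
--     label_dict = {}
--
--     for row in data:
--         hospital_number = row[0]
--         label = row[1]
--
--         if label not in label_dict:
--             label_dict[label] = {}
--
--         if hospital_number not in label_dict[label]:
--             label_dict[label][hospital_number] = 1
--         else:
--             label_dict[label][hospital_number] += 1
--
--     return label_dict
-- ===== SOURCE B (Python) =====
-- def count_hospitals_by_label(data):
--     # Pass 1: flat counter keyed by (label, hospital_number) pairs.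
--     counts = {}
--     for row in data:
--         key = (row[1], row[0])
--         counts[key] = counts.get(key, 0) + 1
--     # Pass 2: reshape the flat table into the nested dict.
--     result = {}
--     for (label, hospital), n in counts.items():
--         result.setdefault(label, {})[hospital] = n
--     return result
-- ===== Notes on version B (the rewrite author's own statement) =====
-- stated objective: alternative
-- what changed: B first builds a flat counter keyed by (label, hospital) pairs in one pass, then reshapes that table into the nested dict in a second pass, instead of A's single pass over the data with nested conditional dict increments.
import Mathlib
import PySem

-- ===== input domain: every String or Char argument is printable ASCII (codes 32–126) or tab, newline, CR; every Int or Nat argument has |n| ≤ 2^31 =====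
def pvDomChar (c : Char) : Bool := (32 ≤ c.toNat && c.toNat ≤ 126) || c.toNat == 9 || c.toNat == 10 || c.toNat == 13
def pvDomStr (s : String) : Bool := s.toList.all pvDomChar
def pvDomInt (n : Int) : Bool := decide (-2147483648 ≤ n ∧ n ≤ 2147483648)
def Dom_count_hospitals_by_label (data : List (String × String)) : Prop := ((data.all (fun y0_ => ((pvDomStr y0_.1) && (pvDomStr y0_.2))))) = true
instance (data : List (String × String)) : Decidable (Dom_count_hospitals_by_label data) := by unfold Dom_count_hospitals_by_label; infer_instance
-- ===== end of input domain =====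

-- B builds a flat (label, hospital)-pair counter first, then reshapes it into the nested dict in a second
-- pass, instead of A's single pass with nested conditional increments (alternative decomposition, same value).


-- ===== PORT A =====
-- single pass: nested dict, conditional creation of the inner dict, conditional increment
def count_hospitals_by_label (data : List (String × String)) : List (String × List (String × Int)) :=
  let label_dict : PySem.Dict String (PySem.Dict String Int) :=
    data.foldl (fun d row =>
      let hospital_number := row.1
      let label := row.2
      let d := if d.contains label then d else d.insert label PySem.Dict.empty
      let inner := d.getD label PySem.Dict.empty
      if inner.contains hospital_number then
        d.insert label (inner.insert hospital_number (inner.getD hospital_number 0 + 1))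
      else
        d.insert label (inner.insert hospital_number 1)) PySem.Dict.empty
  label_dict.items.map (fun p => (p.1, p.2.items))

-- ===== PORT B =====
-- pass 1: flat counter keyed by (label, hospital) pairs; pass 2: reshape into the nested dict
def count_hospitals_by_label_alt (data : List (String × String)) : List (String × List (String × Int)) :=
  let counts : PySem.Dict (String × String) Int :=
    data.foldl (fun d row => d.insert (row.2, row.1) (d.getD (row.2, row.1) 0 + 1)) PySem.Dict.empty
  let result : PySem.Dict String (PySem.Dict String Int) :=
    counts.items.foldl (fun d pn =>
      let d := d.setdefault pn.1.1 PySem.Dict.empty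
      d.insert pn.1.1 ((d.getD pn.1.1 PySem.Dict.empty).insert pn.1.2 pn.2)) PySem.Dict.empty
  result.items.map (fun p => (p.1, p.2.items))

-- ===== PRECONDITION & SPEC =====
def Spec_count_hospitals_by_label (data : List (String × String)) (out : List (String × List (String × Int))) : Prop := out = count_hospitals_by_label_alt data
instance (data : List (String × String)) (out : List (String × List (String × Int))) : Decidable (Spec_count_hospitals_by_label data out) := by unfold Spec_count_hospitals_by_label; infer_instance

-- ===== CLAIM (what is proved, stated in full; the proofs are below) =====
def Claim_equal_count_hospitals_by_label : Prop := ∀ (data : List (String × String)), Dom_count_hospitals_by_label data → Spec_count_hospitals_by_label data (count_hospitals_by_label data)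

-- ===== LEMMAS AND PROOFS =====

-- the canonical description of the result both ports are reduced to:
-- distinct labels in first-occurrence order; per label the distinct (label, hospital) pairs with their counts
def pvCanon (data : List (String × String)) : List (String × List (String × Int)) :=
  (PySem.Set.ofList (data.map (fun r => r.2))).map (fun lab =>
    (lab, (PySem.Set.ofList ((data.map (fun r => (r.2, r.1))).filter (fun p => p.1 == lab))).map
      (fun p => (p.2, ((data.map (fun r => (r.2, r.1))).count p : Int)))))

-- A's loop body, normalised: it is one insert at key row.2 of the updated inner dict
lemma stepA_norm (d : PySem.Dict String (PySem.Dict String Int)) (row : String × String) :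
    (let hospital_number := row.1
     let label := row.2
     let d := if d.contains label then d else d.insert label PySem.Dict.empty
     let inner := d.getD label PySem.Dict.empty
     if inner.contains hospital_number then
       d.insert label (inner.insert hospital_number (inner.getD hospital_number 0 + 1))
     else
       d.insert label (inner.insert hospital_number 1))
    = d.insert row.2 ((d.getD row.2 PySem.Dict.empty).insert row.1
        ((d.getD row.2 PySem.Dict.empty).getD row.1 0 + 1)) := by
  by_cases hc : d.contains row.2
  · simp only [hc, if_true]
    by_cases hi : (d.getD row.2 PySem.Dict.empty).contains row.1
    · simp [hi]
    · simp only [Bool.not_eq_true] at hi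
      simp [hi, PySem.Dict.getD_of_not_contains _ _ hi]
  · simp only [Bool.not_eq_true] at hc
    simp only [hc, Bool.false_eq_true, if_false]
    simp [PySem.Dict.getD_insert_self, PySem.Dict.contains_empty,
      PySem.Dict.insert_insert_self, PySem.Dict.getD_of_not_contains _ _ hc]

-- B's loop body, normalised: setdefault followed by insert at the same key is a plain insert
lemma stepB_norm (d : PySem.Dict String (PySem.Dict String Int)) (pn : (String × String) × Int) :
    (let d := d.setdefault pn.1.1 PySem.Dict.empty
     d.insert pn.1.1 ((d.getD pn.1.1 PySem.Dict.empty).insert pn.1.2 pn.2))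
    = d.insert pn.1.1 ((d.getD pn.1.1 PySem.Dict.empty).insert pn.1.2 pn.2) := by
  by_cases hc : d.contains pn.1.1
  · simp [PySem.Dict.setdefault_of_contains _ _ hc]
  · simp only [Bool.not_eq_true] at hc
    simp [PySem.Dict.setdefault_of_not_contains _ _ hc, PySem.Dict.getD_insert_self,
      PySem.Dict.insert_insert_self, PySem.Dict.getD_of_not_contains _ _ hc]

-- group-lookup: in a keyed insert-accumulate loop, the value at k is the fold over the elements keyed k
lemma getD_foldl_insert_group {α κ ν : Type} [BEq κ] [LawfulBEq κ]
    (l : List α) (key : α → κ) (g : ν → α → ν) (d : PySem.Dict κ ν) (d0 : ν) (k : κ) :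
    (l.foldl (fun d x => d.insert (key x) (g (d.getD (key x) d0) x)) d).getD k d0
    = (l.filter (fun x => key x == k)).foldl g (d.getD k d0) := by
  induction l generalizing d with
  | nil => rfl
  | cons x xs ih =>
    simp only [List.foldl_cons, List.filter_cons]
    rw [ih]
    by_cases h : key x = k
    · simp [h, PySem.Dict.getD_insert_self]
    · have hb : (key x == k) = false := by simp [h]
      simp only [hb, Bool.false_eq_true, if_false]
      rw [PySem.Dict.getD_insert_of_ne]
      exact fun e => h e.symm

-- first-occurrence dedup of a mapped list equals dedup of the map of the dedup
lemma ofList_map_ofList {α β : Type} [BEq α] [LawfulBEq α] [BEq β] [LawfulBEq β]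
    (l : List α) (f : α → β) :
    PySem.Set.ofList (l.map f) = PySem.Set.ofList ((PySem.Set.ofList l).map f) := by
  induction l using List.reverseRecOn with
  | nil => rfl
  | append_singleton l x ih =>
    rw [List.map_append, List.map_singleton, PySem.Set.ofList_append_singleton,
      PySem.Set.ofList_append_singleton, ih]
    by_cases hx : x ∈ PySem.Set.ofList l
    · have hfx : f x ∈ PySem.Set.ofList ((PySem.Set.ofList l).map f) :=
        (PySem.Set.mem_ofList _ _).2 (List.mem_map_of_mem hx)
      rw [PySem.Set.add_of_mem hx, PySem.Set.add_of_mem hfx]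
    · rw [PySem.Set.add_of_not_mem hx, List.map_append, List.map_singleton,
        PySem.Set.ofList_append_singleton]

-- first-occurrence dedup commutes with filter
lemma ofList_filter {α : Type} [BEq α] [LawfulBEq α] (l : List α) (q : α → Bool) :
    PySem.Set.ofList (l.filter q) = (PySem.Set.ofList l).filter q := by
  induction l using List.reverseRecOn with
  | nil => rfl
  | append_singleton l x ih =>
    rw [List.filter_append, List.filter_singleton]
    by_cases hq : q x
    · rw [hq, cond_true, PySem.Set.ofList_append_singleton,
        PySem.Set.ofList_append_singleton, ih]
      by_cases hx : x ∈ PySem.Set.ofList l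
      · rw [PySem.Set.add_of_mem (List.mem_filter.2 ⟨hx, hq⟩), PySem.Set.add_of_mem hx]
      · rw [PySem.Set.add_of_not_mem (fun hmem => hx (List.mem_filter.1 hmem).1),
          PySem.Set.add_of_not_mem hx, List.filter_append, List.filter_singleton, hq, cond_true]
    · have hq' : q x = false := by simpa using hq
      rw [hq', cond_false, List.append_nil, ih, PySem.Set.ofList_append_singleton]
      by_cases hx : x ∈ PySem.Set.ofList l
      · rw [PySem.Set.add_of_mem hx]
      · rw [PySem.Set.add_of_not_mem hx, List.filter_append, List.filter_singleton, hq',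
          cond_false, List.append_nil]

-- first-occurrence dedup commutes with a map injective on the list
lemma ofList_map_inj {α β : Type} [BEq α] [LawfulBEq α] [BEq β] [LawfulBEq β]
    (l : List α) (f : α → β) (hinj : ∀ a ∈ l, ∀ b ∈ l, f a = f b → a = b) :
    PySem.Set.ofList (l.map f) = (PySem.Set.ofList l).map f := by
  induction l using List.reverseRecOn with
  | nil => rfl
  | append_singleton l x ih =>
    have hinj' : ∀ a ∈ l, ∀ b ∈ l, f a = f b → a = b := fun a ha b hb =>
      hinj a (List.mem_append_left _ ha) b (List.mem_append_left _ hb)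
    rw [List.map_append, List.map_singleton, PySem.Set.ofList_append_singleton,
      PySem.Set.ofList_append_singleton, ih hinj']
    by_cases hx : x ∈ PySem.Set.ofList l
    · rw [PySem.Set.add_of_mem hx, PySem.Set.add_of_mem (List.mem_map_of_mem hx)]
    · rw [PySem.Set.add_of_not_mem hx, List.map_append, List.map_singleton,
        PySem.Set.add_of_not_mem]
      intro hmem
      obtain ⟨a, ha, hfa⟩ := List.mem_map.1 hmem
      have hal : a ∈ l := (PySem.Set.mem_ofList _ _).1 ha
      have := hinj a (List.mem_append_left _ hal) x
        (List.mem_append_right _ (List.mem_singleton_self x)) hfa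
      exact hx (this ▸ ha)

-- counting through a map that is injective at p relative to l
lemma count_map_at {α β : Type} [BEq α] [LawfulBEq α] [BEq β] [LawfulBEq β]
    (l : List α) (f : α → β) (p : α) (h : ∀ x ∈ l, f x = f p → x = p) :
    (l.map f).count (f p) = l.count p := by
  induction l with
  | nil => rfl
  | cons y ys ih =>
    have h' : ∀ x ∈ ys, f x = f p → x = p := fun x hx => h x (List.mem_cons_of_mem _ hx)
    simp only [List.map_cons, List.count_cons, ih h']
    by_cases hy : y = p
    · simp [hy]
    · have : ¬ f y = f p := fun e => hy (h y List.mem_cons_self e)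
      simp [hy, this]

-- A's inner dict items at label lab, rewritten to the canonical pair form
lemma inner_eq (data : List (String × String)) (lab : String) :
    (PySem.Set.ofList ((data.filter (fun row => row.2 == lab)).map (fun row => row.1))).map
      (fun h => (h, (((data.filter (fun row => row.2 == lab)).map (fun row => row.1)).count h : Int)))
    = (PySem.Set.ofList ((data.map (fun r => (r.2, r.1))).filter (fun p => p.1 == lab))).map
      (fun p => (p.2, ((data.map (fun r => (r.2, r.1))).count p : Int))) := by
  set pairs := data.map (fun r => (r.2, r.1)) with hpairs
  set fl := pairs.filter (fun p => p.1 == lab) with hfl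
  have hmem1 : ∀ p ∈ fl, p.1 = lab := by
    intro p hp
    simpa using (List.mem_filter.1 hp).2
  have hhs : (data.filter (fun row => row.2 == lab)).map (fun row => row.1) = fl.map (fun p => p.2) := by
    rw [hfl, hpairs, List.filter_map, List.map_map]
    rfl
  rw [hhs]
  have hinj : ∀ a ∈ fl, ∀ b ∈ fl, a.2 = b.2 → a = b := by
    intro a ha b hb hab
    exact Prod.ext ((hmem1 a ha).trans (hmem1 b hb).symm) hab
  rw [ofList_map_inj fl (fun p => p.2) hinj, List.map_map]
  apply List.map_congr_left
  intro p hp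
  have hpfl : p ∈ fl := (PySem.Set.mem_ofList fl p).1 hp
  simp only [Function.comp_apply]
  refine congrArg (fun z => (p.2, z)) ?_
  have h1 : (fl.map (fun p => p.2)).count p.2 = fl.count p :=
    count_map_at fl (fun p => p.2) p (fun x hx hxe => hinj x hx p hpfl hxe)
  have h2 : fl.count p = pairs.count p := by
    rw [hfl]
    exact List.count_filter (by simp [hmem1 p hpfl])
  rw [h1, h2]

-- A computes the canonical result
lemma a_eq_canon (data : List (String × String)) :
    count_hospitals_by_label data = pvCanon data := by
  unfold count_hospitals_by_label pvCanon
  simp only []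
  have hstep : (fun (d : PySem.Dict String (PySem.Dict String Int)) (row : String × String) =>
      let hospital_number := row.1
      let label := row.2
      let d := if d.contains label then d else d.insert label PySem.Dict.empty
      let inner := d.getD label PySem.Dict.empty
      if inner.contains hospital_number then
        d.insert label (inner.insert hospital_number (inner.getD hospital_number 0 + 1))
      else
        d.insert label (inner.insert hospital_number 1))
      = (fun d row => d.insert row.2 ((d.getD row.2 PySem.Dict.empty).insert row.1
          ((d.getD row.2 PySem.Dict.empty).getD row.1 0 + 1))) :=
    funext fun d => funext fun row => stepA_norm d row
  rw [hstep]
  set F := List.foldl (fun (d : PySem.Dict String (PySem.Dict String Int)) (row : String × String) =>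
      d.insert row.2 ((d.getD row.2 PySem.Dict.empty).insert row.1
        ((d.getD row.2 PySem.Dict.empty).getD row.1 0 + 1))) PySem.Dict.empty data with hF
  have hnodup : F.keys.Nodup := by
    rw [hF]
    exact PySem.Dict.nodup_keys_foldl_insert_key data (fun row => row.2) _ _ (by simp [PySem.Dict.keys_empty])
  have hkeys : F.keys = PySem.Set.ofList (data.map (fun r => r.2)) := by
    rw [hF, PySem.Dict.keys_foldl_insert_key data (fun row => row.2)
      (fun d row => ((d.getD row.2 PySem.Dict.empty).insert row.1
        ((d.getD row.2 PySem.Dict.empty).getD row.1 0 + 1))) PySem.Dict.empty]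
    rw [PySem.Dict.keys_empty, PySem.Set.update_nil_left]
  rw [PySem.Dict.items_eq_map_keys F hnodup PySem.Dict.empty, hkeys, List.map_map]
  apply List.map_congr_left
  intro lab _
  simp only [Function.comp_apply]
  refine congrArg (fun z => (lab, z)) ?_
  have hgrp := getD_foldl_insert_group data (fun row => row.2)
    (fun (i : PySem.Dict String Int) (row : String × String) => i.insert row.1 (i.getD row.1 0 + 1))
    PySem.Dict.empty PySem.Dict.empty lab
  simp only [PySem.Dict.getD_empty] at hgrp
  rw [hF]
  refine (congrArg PySem.Dict.items hgrp).trans ?_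
  rw [← List.foldl_map (f := fun (row : String × String) => row.1)
    (g := fun (i : PySem.Dict String Int) h => i.insert h (i.getD h 0 + 1)),
    PySem.Dict.foldl_insert_getD_add_one_eq_counter, PySem.Dict.items_counter]
  exact inner_eq data lab

-- B computes the canonical result
lemma alt_eq_canon (data : List (String × String)) :
    count_hospitals_by_label_alt data = pvCanon data := by
  unfold count_hospitals_by_label_alt pvCanon
  simp only []
  have hc : (data.foldl (fun d row => d.insert (row.2, row.1) (d.getD (row.2, row.1) 0 + 1))
      (PySem.Dict.empty : PySem.Dict (String × String) Int))
      = PySem.Dict.counter (data.map (fun r => (r.2, r.1))) := by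
    rw [← PySem.Dict.foldl_insert_getD_add_one_eq_counter, List.foldl_map]
  rw [hc, PySem.Dict.items_counter]
  have hstep : (fun (d : PySem.Dict String (PySem.Dict String Int)) (pn : (String × String) × Int) =>
      let d := d.setdefault pn.1.1 PySem.Dict.empty
      d.insert pn.1.1 ((d.getD pn.1.1 PySem.Dict.empty).insert pn.1.2 pn.2))
      = (fun d pn => d.insert pn.1.1 ((d.getD pn.1.1 PySem.Dict.empty).insert pn.1.2 pn.2)) :=
    funext fun d => funext fun pn => stepB_norm d pn
  rw [hstep]
  set pairs := data.map (fun r => (r.2, r.1)) with hpairs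
  set S := PySem.Set.ofList pairs with hS
  set items := S.map (fun k => (k, (pairs.count k : Int))) with hitems
  set F := List.foldl (fun (d : PySem.Dict String (PySem.Dict String Int)) pn =>
      d.insert pn.1.1 ((d.getD pn.1.1 PySem.Dict.empty).insert pn.1.2 pn.2)) PySem.Dict.empty items with hF
  have hnodup : F.keys.Nodup := by
    rw [hF]
    exact PySem.Dict.nodup_keys_foldl_insert_key items (fun pn => pn.1.1) _ _ (by simp [PySem.Dict.keys_empty])
  have hkeys : F.keys = PySem.Set.ofList (data.map (fun r => r.2)) := by
    rw [hF, PySem.Dict.keys_foldl_insert_key items (fun pn => pn.1.1)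
      (fun d pn => ((d.getD pn.1.1 PySem.Dict.empty).insert pn.1.2 pn.2)) PySem.Dict.empty]
    rw [PySem.Dict.keys_empty, PySem.Set.update_nil_left, hitems, List.map_map]
    have : ((fun (pn : (String × String) × Int) => pn.1.1) ∘ fun k => (k, (pairs.count k : Int)))
        = fun (p : String × String) => p.1 := rfl
    rw [this, ← ofList_map_ofList, hpairs, List.map_map]
    rfl
  rw [PySem.Dict.items_eq_map_keys F hnodup PySem.Dict.empty, hkeys, List.map_map]
  apply List.map_congr_left
  intro lab _
  simp only [Function.comp_apply]
  refine congrArg (fun z => (lab, z)) ?_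
  rw [hF, getD_foldl_insert_group items (fun pn => pn.1.1)
    (fun i (pn : (String × String) × Int) => i.insert pn.1.2 pn.2) PySem.Dict.empty PySem.Dict.empty lab]
  rw [PySem.Dict.getD_empty, hitems, List.filter_map]
  have hcomp : ((fun (pn : (String × String) × Int) => pn.1.1 == lab) ∘ fun k => (k, (pairs.count k : Int)))
      = fun (p : String × String) => p.1 == lab := rfl
  rw [hcomp, List.foldl_map]
  have hfresh := PySem.Dict.items_foldl_insert_fresh (S.filter (fun p => p.1 == lab))
    (fun p => p.2) (fun p => (pairs.count p : Int)) PySem.Dict.empty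
    (fun a _ => PySem.Dict.contains_empty _)
    (by
      apply List.Nodup.map_on
      · intro x hx y hy hxy
        have hx1 : x.1 = lab := by simpa using (List.mem_filter.1 hx).2
        have hy1 : y.1 = lab := by simpa using (List.mem_filter.1 hy).2
        exact Prod.ext (hx1.trans hy1.symm) hxy
      · exact (PySem.Set.nodup_ofList pairs).filter _)
  simpa [ofList_filter] using hfresh

-- ===== VERDICT (by name: the statement is the Claim_ definition above) =====
theorem count_hospitals_by_label_spec : Claim_equal_count_hospitals_by_label := by
  intro data _
  unfold Spec_count_hospitals_by_label
  rw [a_eq_canon, alt_eq_canon]
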